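-- pv_equiv track=rewrite | github.com/ihlar/aoc21 | 11/solution.py | increase_or_flash
-- ===== SOURCE A (Python) =====
-- def increase_or_flash(x, y, grid):
--     if x < 0 or y < 0 or y > len(grid) - 1 or x > len(grid[y]) - 1:
--         return 0
--     e = grid[y][x]
--     if e == 0:
--         return 0
--     if e < 9:
--         grid[y][x] += 1
--         return 0
--     else: # e == 9
--         grid[y][x] = 0
--         return (
--             1 +
--             increase_or_flash(x-1, y, grid)   +
--             increase_or_flash(x+1, y, grid)   +
--             increase_or_flash(x, y-1, grid)   +
--             increase_or_flash(x, y+1, grid)   +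
--             increase_or_flash(x-1, y-1, grid) +
--             increase_or_flash(x-1, y+1, grid) +
--             increase_or_flash(x+1, y-1, grid) +
--             increase_or_flash(x+1, y+1, grid)
--         )
-- ===== SOURCE B (Python) =====
-- def increase_or_flash(x, y, grid):
--     # Iterative version: explicit LIFO work-stack instead of recursion.
--     count = 0
--     stack = [(x, y)]
--     while stack:
--         cx, cy = stack.pop()
--         if cx < 0 or cy < 0 or cy > len(grid) - 1 or cx > len(grid[cy]) - 1:
--             continue
--         e = grid[cy][cx]
--         if e == 0:
--             continue
--         if e < 9:
--             grid[cy][cx] += 1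
--         else:
--             grid[cy][cx] = 0
--             count += 1
--             # pushed so that the left/first neighbour is popped first
--             stack.extend([(cx+1, cy+1), (cx+1, cy-1), (cx-1, cy+1), (cx-1, cy-1),
--                           (cx, cy+1), (cx, cy-1), (cx+1, cy), (cx-1, cy)])
--     return count
-- ===== Notes on version B (the rewrite author's own statement) =====
-- stated objective: alternative
-- what changed: Replaces A's 8-way self-recursion over the grid by an iterative while-loop over an explicit LIFO work-stack of cells, accumulating the flash count in a local counter.
import Mathlib
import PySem

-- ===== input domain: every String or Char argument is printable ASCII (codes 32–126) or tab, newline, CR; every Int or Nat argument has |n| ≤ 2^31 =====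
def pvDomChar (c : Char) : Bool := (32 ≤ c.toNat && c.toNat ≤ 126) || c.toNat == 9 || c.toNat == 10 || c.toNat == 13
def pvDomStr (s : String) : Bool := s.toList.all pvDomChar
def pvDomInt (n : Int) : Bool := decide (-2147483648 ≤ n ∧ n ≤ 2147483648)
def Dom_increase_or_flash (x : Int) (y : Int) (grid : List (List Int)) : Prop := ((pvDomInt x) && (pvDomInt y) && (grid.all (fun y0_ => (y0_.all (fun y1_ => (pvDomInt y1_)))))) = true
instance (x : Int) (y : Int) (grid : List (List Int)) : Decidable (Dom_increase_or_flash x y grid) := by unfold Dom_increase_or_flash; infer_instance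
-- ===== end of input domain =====

-- B replaces A's 8-way recursion by an iterative loop over an explicit LIFO work-stack
-- (objective: alternative decomposition, same cost). Both Pythons mutate `grid` identically;
-- the equivalence proved here is about the RETURN value.

-- shared grid primitives: read/write a cell; used only at guarded (in-range, non-negative) indices
def cellGet (g : List (List Int)) (x y : Int) : Int := (g.getD y.toNat []).getD x.toNat 0
def cellSet (g : List (List Int)) (x y v : Int) : List (List Int) :=
  g.set y.toNat ((g.getD y.toNat []).set x.toNat v)
-- number of nonzero cells: strictly decreases at every flash, hence bounds the fuel used below
def phiRow (r : List Int) : Nat := r.countP (fun e => decide (e ≠ 0))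
def phi (g : List (List Int)) : Nat := (g.map phiRow).sum

-- ===== PORT A =====
-- fuel-guarded transliteration of A's recursion; fuel (phi grid + 1) is provably sufficient
-- (every recursive call happens only under a flash, which zeroes a nonzero cell for good)
def iofA : Nat → Int → Int → List (List Int) → Int × List (List Int)
  | 0, _, _, g => (0, g)   -- fuel exhaustion: unreachable at the fuel used below
  | f+1, x, y, g =>
    if x < 0 ∨ y < 0 ∨ y > (g.length : Int) - 1 ∨ x > ((g.getD y.toNat []).length : Int) - 1 then
      (0, g)
    else
      let e := cellGet g x y
      if e = 0 then (0, g)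
      else if e < 9 then (0, cellSet g x y (e + 1))
      else
        let g0 := cellSet g x y 0
        let r1 := iofA f (x-1) y g0
        let r2 := iofA f (x+1) y r1.2
        let r3 := iofA f x (y-1) r2.2
        let r4 := iofA f x (y+1) r3.2
        let r5 := iofA f (x-1) (y-1) r4.2
        let r6 := iofA f (x-1) (y+1) r5.2
        let r7 := iofA f (x+1) (y-1) r6.2
        let r8 := iofA f (x+1) (y+1) r7.2
        (1 + r1.1 + r2.1 + r3.1 + r4.1 + r5.1 + r6.1 + r7.1 + r8.1, r8.2)

def increase_or_flash (x : Int) (y : Int) (grid : List (List Int)) : Int :=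
  (iofA (phi grid + 1) x y grid).1

-- ===== PORT B =====
-- fuel-guarded transliteration of B's while-loop over the explicit stack (list head = top);
-- fuel (9 * phi grid + 9) is provably sufficient (at most 1 + 9·phi pops ever happen)
def iofB : Nat → List (Int × Int) → Int → List (List Int) → Int × List (List Int)
  | 0, _, c, g => (c, g)   -- fuel exhaustion: unreachable at the fuel used below
  | _+1, [], c, g => (c, g)
  | f+1, (x, y) :: rest, c, g =>
    if x < 0 ∨ y < 0 ∨ y > (g.length : Int) - 1 ∨ x > ((g.getD y.toNat []).length : Int) - 1 then
      iofB f rest c g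
    else
      let e := cellGet g x y
      if e = 0 then iofB f rest c g
      else if e < 9 then iofB f rest c (cellSet g x y (e + 1))
      else
        iofB f ((x-1,y)::(x+1,y)::(x,y-1)::(x,y+1)::(x-1,y-1)::(x-1,y+1)::(x+1,y-1)::(x+1,y+1)::rest)
          (c + 1) (cellSet g x y 0)

def increase_or_flash_alt (x : Int) (y : Int) (grid : List (List Int)) : Int :=
  (iofB (9 * phi grid + 9) [(x, y)] 0 grid).1

-- ===== PRECONDITION & SPEC =====
def Spec_increase_or_flash (x : Int) (y : Int) (grid : List (List Int)) (out : Int) : Prop := out = increase_or_flash_alt x y grid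
instance (x : Int) (y : Int) (grid : List (List Int)) (out : Int) : Decidable (Spec_increase_or_flash x y grid out) := by unfold Spec_increase_or_flash; infer_instance

-- ===== CLAIM (what is proved, stated in full; the proofs are below) =====
def Claim_equal_increase_or_flash : Prop := ∀ (x : Int) (y : Int) (grid : List (List Int)), Dom_increase_or_flash x y grid → Spec_increase_or_flash x y grid (increase_or_flash x y grid)

-- ===== LEMMAS AND PROOFS =====

-- row-level counting
theorem phiRow_set_le (r : List Int) (i : Nat) (v : Int) (h : r.getD i 0 ≠ 0) :
    phiRow (r.set i v) ≤ phiRow r := by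
  induction r generalizing i with
  | nil => simp at h
  | cons a t ihr =>
    cases i with
    | zero =>
      have ha : a ≠ 0 := by simpa using h
      simp only [List.set_cons_zero, phiRow, List.countP_cons]
      split_ifs <;> simp_all
    | succ j =>
      have h' : t.getD j 0 ≠ 0 := by simpa using h
      have := ihr j h'
      simp only [List.set_cons_succ, phiRow, List.countP_cons] at *
      omega

theorem phiRow_set_zero (r : List Int) (i : Nat) (h : r.getD i 0 ≠ 0) :
    phiRow (r.set i 0) + 1 = phiRow r := by
  induction r generalizing i with
  | nil => simp at h
  | cons a t ihr =>
    cases i with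
    | zero =>
      have ha : a ≠ 0 := by simpa using h
      simp only [List.set_cons_zero, phiRow, List.countP_cons]
      split_ifs <;> simp_all
    | succ j =>
      have h' : t.getD j 0 ≠ 0 := by simpa using h
      have := ihr j h'
      simp only [List.set_cons_succ, phiRow, List.countP_cons] at *
      omega

-- grid-level counting
theorem phi_setN_le (g : List (List Int)) (j i : Nat) (v : Int)
    (h : (g.getD j []).getD i 0 ≠ 0) :
    phi (g.set j ((g.getD j []).set i v)) ≤ phi g := by
  induction g generalizing j with
  | nil => simp at h
  | cons r t ihg =>
    cases j with
    | zero =>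
      have := phiRow_set_le r i v (by simpa using h)
      simp only [List.getD_cons_zero, List.set_cons_zero, phi, List.map, List.sum_cons]
      omega
    | succ k =>
      have := ihg k (by simpa using h)
      simp only [List.getD_cons_succ, List.set_cons_succ, phi, List.map, List.sum_cons] at this ⊢
      omega

theorem phi_setN_zero (g : List (List Int)) (j i : Nat)
    (h : (g.getD j []).getD i 0 ≠ 0) :
    phi (g.set j ((g.getD j []).set i 0)) + 1 = phi g := by
  induction g generalizing j with
  | nil => simp at h
  | cons r t ihg =>
    cases j with
    | zero =>
      have := phiRow_set_zero r i (by simpa using h)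
      simp only [List.getD_cons_zero, List.set_cons_zero, phi, List.map, List.sum_cons]
      omega
    | succ k =>
      have := ihg k (by simpa using h)
      simp only [List.getD_cons_succ, List.set_cons_succ, phi, List.map, List.sum_cons] at this ⊢
      omega

theorem phi_cellSet_le (g : List (List Int)) (x y v : Int) (h : cellGet g x y ≠ 0) :
    phi (cellSet g x y v) ≤ phi g := phi_setN_le g y.toNat x.toNat v h

theorem phi_cellSet_zero (g : List (List Int)) (x y : Int) (h : cellGet g x y ≠ 0) :
    phi (cellSet g x y 0) + 1 = phi g := phi_setN_zero g y.toNat x.toNat h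

-- A's recursion never increases phi
theorem iofA_phi : ∀ (f : Nat) (x y : Int) (g : List (List Int)), phi (iofA f x y g).2 ≤ phi g := by
  intro f
  induction f with
  | zero => intro x y g; simp [iofA]
  | succ f ih =>
    intro x y g
    simp only [iofA]
    split_ifs with h1 h2 h3
    · simp
    · simp
    · simpa using phi_cellSet_le g x y _ h2
    · have h0 := phi_cellSet_zero g x y h2
      simp only
      exact le_trans (ih _ _ _) (le_trans (ih _ _ _) (le_trans (ih _ _ _) (le_trans (ih _ _ _)
        (le_trans (ih _ _ _) (le_trans (ih _ _ _) (le_trans (ih _ _ _) (le_trans (ih _ _ _)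
        (by omega))))))))

-- canonical-fuel wrappers (proof-only)
def RA (x y : Int) (g : List (List Int)) : Int × List (List Int) := iofA (phi g + 1) x y g
def RB (s : List (Int × Int)) (c : Int) (g : List (List Int)) : Int × List (List Int) :=
  iofB (s.length + 9 * phi g) s c g

-- fuel irrelevance for A: any fuel > phi g computes RA
theorem iofA_canon : ∀ (n : Nat) (g : List (List Int)), phi g ≤ n →
    ∀ (f : Nat) (x y : Int), phi g < f → iofA f x y g = RA x y g := by
  intro n
  induction n with
  | zero =>
    intro g hg f x y hf
    cases f with
    | zero => omega
    | succ fa =>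
      show iofA (fa+1) x y g = iofA (phi g + 1) x y g
      simp only [iofA]
      split_ifs with h1 h2 h3
      · rfl
      · rfl
      · rfl
      · have h0 := phi_cellSet_zero g x y h2
        omega
  | succ n ih =>
    intro g hg f x y hf
    cases f with
    | zero => omega
    | succ fa =>
      show iofA (fa+1) x y g = iofA (phi g + 1) x y g
      simp only [iofA]
      split_ifs with h1 h2 h3
      · rfl
      · rfl
      · rfl
      · have h0 := phi_cellSet_zero g x y h2
        have hq0 : phi (cellSet g x y 0) ≤ phi (cellSet g x y 0) := le_rfl
        have eL0 : iofA fa (x-1) y (cellSet g x y 0) = RA (x-1) y (cellSet g x y 0) := ih (cellSet g x y 0) (by omega) fa (x-1) y (by omega)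
        have eR0 : iofA (phi g) (x-1) y (cellSet g x y 0) = RA (x-1) y (cellSet g x y 0) := ih (cellSet g x y 0) (by omega) (phi g) (x-1) y (by omega)
        rw [eL0, eR0]
        have hq1 : phi (RA (x-1) y (cellSet g x y 0)).2 ≤ phi (cellSet g x y 0) := le_trans (iofA_phi _ _ _ _) hq0
        have eL1 : iofA fa (x+1) y (RA (x-1) y (cellSet g x y 0)).2 = RA (x+1) y (RA (x-1) y (cellSet g x y 0)).2 := ih (RA (x-1) y (cellSet g x y 0)).2 (by omega) fa (x+1) y (by omega)
        have eR1 : iofA (phi g) (x+1) y (RA (x-1) y (cellSet g x y 0)).2 = RA (x+1) y (RA (x-1) y (cellSet g x y 0)).2 := ih (RA (x-1) y (cellSet g x y 0)).2 (by omega) (phi g) (x+1) y (by omega)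
        rw [eL1, eR1]
        have hq2 : phi (RA (x+1) y (RA (x-1) y (cellSet g x y 0)).2).2 ≤ phi (cellSet g x y 0) := le_trans (iofA_phi _ _ _ _) hq1
        have eL2 : iofA fa x (y-1) (RA (x+1) y (RA (x-1) y (cellSet g x y 0)).2).2 = RA x (y-1) (RA (x+1) y (RA (x-1) y (cellSet g x y 0)).2).2 := ih (RA (x+1) y (RA (x-1) y (cellSet g x y 0)).2).2 (by omega) fa x (y-1) (by omega)
        have eR2 : iofA (phi g) x (y-1) (RA (x+1) y (RA (x-1) y (cellSet g x y 0)).2).2 = RA x (y-1) (RA (x+1) y (RA (x-1) y (cellSet g x y 0)).2).2 := ih (RA (x+1) y (RA (x-1) y (cellSet g x y 0)).2).2 (by omega) (phi g) x (y-1) (by omega)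
        rw [eL2, eR2]
        have hq3 : phi (RA x (y-1) (RA (x+1) y (RA (x-1) y (cellSet g x y 0)).2).2).2 ≤ phi (cellSet g x y 0) := le_trans (iofA_phi _ _ _ _) hq2
        have eL3 : iofA fa x (y+1) (RA x (y-1) (RA (x+1) y (RA (x-1) y (cellSet g x y 0)).2).2).2 = RA x (y+1) (RA x (y-1) (RA (x+1) y (RA (x-1) y (cellSet g x y 0)).2).2).2 := ih (RA x (y-1) (RA (x+1) y (RA (x-1) y (cellSet g x y 0)).2).2).2 (by omega) fa x (y+1) (by omega)
        have eR3 : iofA (phi g) x (y+1) (RA x (y-1) (RA (x+1) y (RA (x-1) y (cellSet g x y 0)).2).2).2 = RA x (y+1) (RA x (y-1) (RA (x+1) y (RA (x-1) y (cellSet g x y 0)).2).2).2 := ih (RA x (y-1) (RA (x+1) y (RA (x-1) y (cellSet g x y 0)).2).2).2 (by omega) (phi g) x (y+1) (by omega)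
        rw [eL3, eR3]
        have hq4 : phi (RA x (y+1) (RA x (y-1) (RA (x+1) y (RA (x-1) y (cellSet g x y 0)).2).2).2).2 ≤ phi (cellSet g x y 0) := le_trans (iofA_phi _ _ _ _) hq3
        have eL4 : iofA fa (x-1) (y-1) (RA x (y+1) (RA x (y-1) (RA (x+1) y (RA (x-1) y (cellSet g x y 0)).2).2).2).2 = RA (x-1) (y-1) (RA x (y+1) (RA x (y-1) (RA (x+1) y (RA (x-1) y (cellSet g x y 0)).2).2).2).2 := ih (RA x (y+1) (RA x (y-1) (RA (x+1) y (RA (x-1) y (cellSet g x y 0)).2).2).2).2 (by omega) fa (x-1) (y-1) (by omega)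
        have eR4 : iofA (phi g) (x-1) (y-1) (RA x (y+1) (RA x (y-1) (RA (x+1) y (RA (x-1) y (cellSet g x y 0)).2).2).2).2 = RA (x-1) (y-1) (RA x (y+1) (RA x (y-1) (RA (x+1) y (RA (x-1) y (cellSet g x y 0)).2).2).2).2 := ih (RA x (y+1) (RA x (y-1) (RA (x+1) y (RA (x-1) y (cellSet g x y 0)).2).2).2).2 (by omega) (phi g) (x-1) (y-1) (by omega)
        rw [eL4, eR4]
        have hq5 : phi (RA (x-1) (y-1) (RA x (y+1) (RA x (y-1) (RA (x+1) y (RA (x-1) y (cellSet g x y 0)).2).2).2).2).2 ≤ phi (cellSet g x y 0) := le_trans (iofA_phi _ _ _ _) hq4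
        have eL5 : iofA fa (x-1) (y+1) (RA (x-1) (y-1) (RA x (y+1) (RA x (y-1) (RA (x+1) y (RA (x-1) y (cellSet g x y 0)).2).2).2).2).2 = RA (x-1) (y+1) (RA (x-1) (y-1) (RA x (y+1) (RA x (y-1) (RA (x+1) y (RA (x-1) y (cellSet g x y 0)).2).2).2).2).2 := ih (RA (x-1) (y-1) (RA x (y+1) (RA x (y-1) (RA (x+1) y (RA (x-1) y (cellSet g x y 0)).2).2).2).2).2 (by omega) fa (x-1) (y+1) (by omega)
        have eR5 : iofA (phi g) (x-1) (y+1) (RA (x-1) (y-1) (RA x (y+1) (RA x (y-1) (RA (x+1) y (RA (x-1) y (cellSet g x y 0)).2).2).2).2).2 = RA (x-1) (y+1) (RA (x-1) (y-1) (RA x (y+1) (RA x (y-1) (RA (x+1) y (RA (x-1) y (cellSet g x y 0)).2).2).2).2).2 := ih (RA (x-1) (y-1) (RA x (y+1) (RA x (y-1) (RA (x+1) y (RA (x-1) y (cellSet g x y 0)).2).2).2).2).2 (by omega) (phi g) (x-1) (y+1) (by omega)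
        rw [eL5, eR5]
        have hq6 : phi (RA (x-1) (y+1) (RA (x-1) (y-1) (RA x (y+1) (RA x (y-1) (RA (x+1) y (RA (x-1) y (cellSet g x y 0)).2).2).2).2).2).2 ≤ phi (cellSet g x y 0) := le_trans (iofA_phi _ _ _ _) hq5
        have eL6 : iofA fa (x+1) (y-1) (RA (x-1) (y+1) (RA (x-1) (y-1) (RA x (y+1) (RA x (y-1) (RA (x+1) y (RA (x-1) y (cellSet g x y 0)).2).2).2).2).2).2 = RA (x+1) (y-1) (RA (x-1) (y+1) (RA (x-1) (y-1) (RA x (y+1) (RA x (y-1) (RA (x+1) y (RA (x-1) y (cellSet g x y 0)).2).2).2).2).2).2 := ih (RA (x-1) (y+1) (RA (x-1) (y-1) (RA x (y+1) (RA x (y-1) (RA (x+1) y (RA (x-1) y (cellSet g x y 0)).2).2).2).2).2).2 (by omega) fa (x+1) (y-1) (by omega)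
        have eR6 : iofA (phi g) (x+1) (y-1) (RA (x-1) (y+1) (RA (x-1) (y-1) (RA x (y+1) (RA x (y-1) (RA (x+1) y (RA (x-1) y (cellSet g x y 0)).2).2).2).2).2).2 = RA (x+1) (y-1) (RA (x-1) (y+1) (RA (x-1) (y-1) (RA x (y+1) (RA x (y-1) (RA (x+1) y (RA (x-1) y (cellSet g x y 0)).2).2).2).2).2).2 := ih (RA (x-1) (y+1) (RA (x-1) (y-1) (RA x (y+1) (RA x (y-1) (RA (x+1) y (RA (x-1) y (cellSet g x y 0)).2).2).2).2).2).2 (by omega) (phi g) (x+1) (y-1) (by omega)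
        rw [eL6, eR6]
        have hq7 : phi (RA (x+1) (y-1) (RA (x-1) (y+1) (RA (x-1) (y-1) (RA x (y+1) (RA x (y-1) (RA (x+1) y (RA (x-1) y (cellSet g x y 0)).2).2).2).2).2).2).2 ≤ phi (cellSet g x y 0) := le_trans (iofA_phi _ _ _ _) hq6
        have eL7 : iofA fa (x+1) (y+1) (RA (x+1) (y-1) (RA (x-1) (y+1) (RA (x-1) (y-1) (RA x (y+1) (RA x (y-1) (RA (x+1) y (RA (x-1) y (cellSet g x y 0)).2).2).2).2).2).2).2 = RA (x+1) (y+1) (RA (x+1) (y-1) (RA (x-1) (y+1) (RA (x-1) (y-1) (RA x (y+1) (RA x (y-1) (RA (x+1) y (RA (x-1) y (cellSet g x y 0)).2).2).2).2).2).2).2 := ih (RA (x+1) (y-1) (RA (x-1) (y+1) (RA (x-1) (y-1) (RA x (y+1) (RA x (y-1) (RA (x+1) y (RA (x-1) y (cellSet g x y 0)).2).2).2).2).2).2).2 (by omega) fa (x+1) (y+1) (by omega)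
        have eR7 : iofA (phi g) (x+1) (y+1) (RA (x+1) (y-1) (RA (x-1) (y+1) (RA (x-1) (y-1) (RA x (y+1) (RA x (y-1) (RA (x+1) y (RA (x-1) y (cellSet g x y 0)).2).2).2).2).2).2).2 = RA (x+1) (y+1) (RA (x+1) (y-1) (RA (x-1) (y+1) (RA (x-1) (y-1) (RA x (y+1) (RA x (y-1) (RA (x+1) y (RA (x-1) y (cellSet g x y 0)).2).2).2).2).2).2).2 := ih (RA (x+1) (y-1) (RA (x-1) (y+1) (RA (x-1) (y-1) (RA x (y+1) (RA x (y-1) (RA (x+1) y (RA (x-1) y (cellSet g x y 0)).2).2).2).2).2).2).2 (by omega) (phi g) (x+1) (y+1) (by omega)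
        rw [eL7, eR7]

-- fuel irrelevance for B: any fuel ≥ |stack| + 9·phi g gives the same result
theorem iofB_nil (f : Nat) (c : Int) (g : List (List Int)) : iofB f [] c g = (c, g) := by
  cases f <;> rfl

theorem iofB_irrel : ∀ (f f' : Nat) (s : List (Int × Int)) (c : Int) (g : List (List Int)),
    s.length + 9 * phi g ≤ f → s.length + 9 * phi g ≤ f' → iofB f s c g = iofB f' s c g := by
  intro f
  induction f with
  | zero =>
    intro f' s c g hf hf'
    have hs : s = [] := by
      cases s with
      | nil => rfl
      | cons p r => simp only [List.length_cons] at hf; omega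
    subst hs
    rw [iofB_nil, iofB_nil]
  | succ f ih =>
    intro f' s c g hf hf'
    cases s with
    | nil => rw [iofB_nil, iofB_nil]
    | cons p rest =>
      obtain ⟨x, y⟩ := p
      cases f' with
      | zero => simp only [List.length_cons] at hf'; omega
      | succ fb =>
        have hlen : ((x, y) :: rest).length = rest.length + 1 := by simp
        simp only [iofB]
        split_ifs with h1 h2 h3
        · exact ih fb rest c g (by omega) (by omega)
        · exact ih fb rest c g (by omega) (by omega)
        · have hple := phi_cellSet_le g x y (cellGet g x y + 1) h2
          exact ih fb rest c _ (by omega) (by omega)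
        · have h0 := phi_cellSet_zero g x y h2
          exact ih fb _ _ _ (by simp; omega) (by simp; omega)

-- the simulation: popping one cell from B's stack performs exactly A's recursive call
theorem sim : ∀ (n : Nat) (g : List (List Int)), phi g ≤ n →
    ∀ (x y c : Int) (rest : List (Int × Int)),
    RB ((x, y) :: rest) c g = RB rest (c + (RA x y g).1) (RA x y g).2 := by
  intro n
  induction n with
  | zero =>
    intro g hg x y c rest
    have hstart : RB ((x, y) :: rest) c g
        = iofB ((rest.length + 9 * phi g) + 1) ((x, y) :: rest) c g := by
      unfold RB
      have : ((x, y) :: rest).length + 9 * phi g = (rest.length + 9 * phi g) + 1 := by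
        simp only [List.length_cons]; omega
      rw [this]
    rw [hstart]
    simp only [iofB]
    split_ifs with h1 h2 h3
    · have hra : RA x y g = (0, g) := by
        show iofA (phi g + 1) x y g = (0, g)
        simp only [iofA]
        rw [if_pos h1]
      rw [hra]
      simp only [add_zero]
      rfl
    · have hra : RA x y g = (0, g) := by
        show iofA (phi g + 1) x y g = (0, g)
        simp only [iofA]
        rw [if_neg h1, if_pos h2]
      rw [hra]
      simp only [add_zero]
      rfl
    · have hra : RA x y g = (0, cellSet g x y (cellGet g x y + 1)) := by
        show iofA (phi g + 1) x y g = _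
        simp only [iofA]
        rw [if_neg h1, if_neg h2, if_pos h3]
      rw [hra]
      simp only [add_zero]
      have hple := phi_cellSet_le g x y (cellGet g x y + 1) h2
      unfold RB
      exact iofB_irrel _ _ _ _ _ (by omega) (by omega)
    · have h0 := phi_cellSet_zero g x y h2
      omega
  | succ n ih =>
    intro g hg x y c rest
    have hstart : RB ((x, y) :: rest) c g
        = iofB ((rest.length + 9 * phi g) + 1) ((x, y) :: rest) c g := by
      unfold RB
      have : ((x, y) :: rest).length + 9 * phi g = (rest.length + 9 * phi g) + 1 := by
        simp only [List.length_cons]; omega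
      rw [this]
    rw [hstart]
    simp only [iofB]
    split_ifs with h1 h2 h3
    · have hra : RA x y g = (0, g) := by
        show iofA (phi g + 1) x y g = (0, g)
        simp only [iofA]
        rw [if_pos h1]
      rw [hra]
      simp only [add_zero]
      rfl
    · have hra : RA x y g = (0, g) := by
        show iofA (phi g + 1) x y g = (0, g)
        simp only [iofA]
        rw [if_neg h1, if_pos h2]
      rw [hra]
      simp only [add_zero]
      rfl
    · have hra : RA x y g = (0, cellSet g x y (cellGet g x y + 1)) := by
        show iofA (phi g + 1) x y g = _
        simp only [iofA]
        rw [if_neg h1, if_neg h2, if_pos h3]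
      rw [hra]
      simp only [add_zero]
      have hple := phi_cellSet_le g x y (cellGet g x y + 1) h2
      unfold RB
      exact iofB_irrel _ _ _ _ _ (by omega) (by omega)
    · have h0 := phi_cellSet_zero g x y h2
      have hl8 : (((x-1), y) :: ((x+1), y) :: (x, (y-1)) :: (x, (y+1)) :: ((x-1), (y-1)) :: ((x-1), (y+1)) :: ((x+1), (y-1)) :: ((x+1), (y+1)) :: rest).length = rest.length + 8 := by simp
      have lft : iofB (rest.length + 9 * phi g) (((x-1), y) :: ((x+1), y) :: (x, (y-1)) :: (x, (y+1)) :: ((x-1), (y-1)) :: ((x-1), (y+1)) :: ((x+1), (y-1)) :: ((x+1), (y+1)) :: rest) (c + 1) (cellSet g x y 0)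
          = RB (((x-1), y) :: ((x+1), y) :: (x, (y-1)) :: (x, (y+1)) :: ((x-1), (y-1)) :: ((x-1), (y+1)) :: ((x+1), (y-1)) :: ((x+1), (y+1)) :: rest) (c + 1) (cellSet g x y 0) := by
        unfold RB
        exact iofB_irrel _ _ _ _ _ (by omega) (by omega)
      rw [lft]
      have sq0 : phi (cellSet g x y 0) ≤ phi (cellSet g x y 0) := le_rfl
      have st0 : RB (((x-1), y) :: ((x+1), y) :: (x, (y-1)) :: (x, (y+1)) :: ((x-1), (y-1)) :: ((x-1), (y+1)) :: ((x+1), (y-1)) :: ((x+1), (y+1)) :: rest) (c + 1) (cellSet g x y 0) = RB (((x+1), y) :: (x, (y-1)) :: (x, (y+1)) :: ((x-1), (y-1)) :: ((x-1), (y+1)) :: ((x+1), (y-1)) :: ((x+1), (y+1)) :: rest) (c + 1 + (RA (x-1) y (cellSet g x y 0)).1) (RA (x-1) y (cellSet g x y 0)).2 := ih (cellSet g x y 0) (by omega) (x-1) y (c + 1) (((x+1), y) :: (x, (y-1)) :: (x, (y+1)) :: ((x-1), (y-1)) :: ((x-1), (y+1)) :: ((x+1), (y-1)) :: ((x+1),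 (y+1)) :: rest)
      rw [st0]
      have sq1 : phi (RA (x-1) y (cellSet g x y 0)).2 ≤ phi (cellSet g x y 0) := le_trans (iofA_phi _ _ _ _) sq0
      have st1 : RB (((x+1), y) :: (x, (y-1)) :: (x, (y+1)) :: ((x-1), (y-1)) :: ((x-1), (y+1)) :: ((x+1), (y-1)) :: ((x+1), (y+1)) :: rest) (c + 1 + (RA (x-1) y (cellSet g x y 0)).1) (RA (x-1) y (cellSet g x y 0)).2 = RB ((x, (y-1)) :: (x, (y+1)) :: ((x-1), (y-1)) :: ((x-1), (y+1)) :: ((x+1), (y-1)) :: ((x+1), (y+1)) :: rest) (c + 1 + (RA (x-1) y (cellSet g x y 0)).1 + (RA (x+1) y (RA (x-1) y (cellSet g x y 0)).2).1) (RA (x+1) y (RA (x-1) y (cellSet g x y 0)).2).2 := ih (RA (x-1) y (cellSet g x y 0)).2 (by omega) (x+1) y (c + 1 + (RA (x-1) y (cellSet g x y 0)).1) ((x, (y-1)) :: (x, (y+1)) :: ((x-1), (y-1)) :: ((x-1), (y+1)) :: ((x+1), (y-1)) :: ((x+1), (y+1)) :: rest)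
      rw [st1]
      have sq2 : phi (RA (x+1) y (RA (x-1) y (cellSet g x y 0)).2).2 ≤ phi (cellSet g x y 0) := le_trans (iofA_phi _ _ _ _) sq1
      have st2 : RB ((x, (y-1)) :: (x, (y+1)) :: ((x-1), (y-1)) :: ((x-1), (y+1)) :: ((x+1), (y-1)) :: ((x+1), (y+1)) :: rest) (c + 1 + (RA (x-1) y (cellSet g x y 0)).1 + (RA (x+1) y (RA (x-1) y (cellSet g x y 0)).2).1) (RA (x+1) y (RA (x-1) y (cellSet g x y 0)).2).2 = RB ((x, (y+1)) :: ((x-1), (y-1)) :: ((x-1), (y+1)) :: ((x+1), (y-1)) :: ((x+1), (y+1)) :: rest) (c + 1 + (RA (x-1) y (cellSet g x y 0)).1 + (RA (x+1) y (RA (x-1) y (cellSet g x y 0)).2).1 + (RA x (y-1) (RA (x+1) y (RA (x-1) y (cellSet g x y 0)).2).2).1) (RA x (y-1) (RA (x+1) y (RA (x-1) y (cellSet g x y 0)).2).2).2 := ih (RA (x+1) y (RA (x-1) y (cellSet g x y 0)).2).2 (by omega) x (y-1) (c + 1 + (RA (x-1) y (cellSet g x y 0)).1 + (RA (x+1) y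 (RA (x-1) y (cellSet g x y 0)).2).1) ((x, (y+1)) :: ((x-1), (y-1)) :: ((x-1), (y+1)) :: ((x+1), (y-1)) :: ((x+1), (y+1)) :: rest)
      rw [st2]
      have sq3 : phi (RA x (y-1) (RA (x+1) y (RA (x-1) y (cellSet g x y 0)).2).2).2 ≤ phi (cellSet g x y 0) := le_trans (iofA_phi _ _ _ _) sq2
      have st3 : RB ((x, (y+1)) :: ((x-1), (y-1)) :: ((x-1), (y+1)) :: ((x+1), (y-1)) :: ((x+1), (y+1)) :: rest) (c + 1 + (RA (x-1) y (cellSet g x y 0)).1 + (RA (x+1) y (RA (x-1) y (cellSet g x y 0)).2).1 + (RA x (y-1) (RA (x+1) y (RA (x-1) y (cellSet g x y 0)).2).2).1) (RA x (y-1) (RA (x+1) y (RA (x-1) y (cellSet g x y 0)).2).2).2 = RB (((x-1), (y-1)) :: ((x-1), (y+1)) :: ((x+1), (y-1)) :: ((x+1), (y+1)) :: rest) (c + 1 + (RA (x-1) y (cellSet g x y 0)).1 + (RA (x+1) y (RA (x-1) y (cellSet g x y 0)).2).1 + (RA x (y-1) (RA (x+1) y (RA (x-1) y (cellSet g x y 0)).2).2).1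 + (RA x (y+1) (RA x (y-1) (RA (x+1) y (RA (x-1) y (cellSet g x y 0)).2).2).2).1) (RA x (y+1) (RA x (y-1) (RA (x+1) y (RA (x-1) y (cellSet g x y 0)).2).2).2).2 := ih (RA x (y-1) (RA (x+1) y (RA (x-1) y (cellSet g x y 0)).2).2).2 (by omega) x (y+1) (c + 1 + (RA (x-1) y (cellSet g x y 0)).1 + (RA (x+1) y (RA (x-1) y (cellSet g x y 0)).2).1 + (RA x (y-1) (RA (x+1) y (RA (x-1) y (cellSet g x y 0)).2).2).1) (((x-1), (y-1)) :: ((x-1), (y+1)) :: ((x+1), (y-1)) :: ((x+1), (y+1)) :: rest)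
      rw [st3]
      have sq4 : phi (RA x (y+1) (RA x (y-1) (RA (x+1) y (RA (x-1) y (cellSet g x y 0)).2).2).2).2 ≤ phi (cellSet g x y 0) := le_trans (iofA_phi _ _ _ _) sq3
      have st4 : RB (((x-1), (y-1)) :: ((x-1), (y+1)) :: ((x+1), (y-1)) :: ((x+1), (y+1)) :: rest) (c + 1 + (RA (x-1) y (cellSet g x y 0)).1 + (RA (x+1) y (RA (x-1) y (cellSet g x y 0)).2).1 + (RA x (y-1) (RA (x+1) y (RA (x-1) y (cellSet g x y 0)).2).2).1 + (RA x (y+1) (RA x (y-1) (RA (x+1) y (RA (x-1) y (cellSet g x y 0)).2).2).2).1) (RA x (y+1) (RA x (y-1) (RA (x+1) y (RA (x-1) y (cellSet g x y 0)).2).2).2).2 = RB (((x-1), (y+1)) :: ((x+1), (y-1)) :: ((x+1), (y+1)) :: rest) (c + 1 + (RA (x-1) y (cellSet g x y 0)).1 + (RA (x+1) y (RA (x-1) y (cellSet g x y 0)).2).1 + (RA x (y-1) (RA (x+1) y (RA (x-1) y (cellSet g x y 0)).2).2).1 + (RA x (y+1) (RA x (y-1) (RA (x+1) y (RA (x-1)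 y (cellSet g x y 0)).2).2).2).1 + (RA (x-1) (y-1) (RA x (y+1) (RA x (y-1) (RA (x+1) y (RA (x-1) y (cellSet g x y 0)).2).2).2).2).1) (RA (x-1) (y-1) (RA x (y+1) (RA x (y-1) (RA (x+1) y (RA (x-1) y (cellSet g x y 0)).2).2).2).2).2 := ih (RA x (y+1) (RA x (y-1) (RA (x+1) y (RA (x-1) y (cellSet g x y 0)).2).2).2).2 (by omega) (x-1) (y-1) (c + 1 + (RA (x-1) y (cellSet g x y 0)).1 + (RA (x+1) y (RA (x-1) y (cellSet g x y 0)).2).1 + (RA x (y-1) (RA (x+1) y (RA (x-1) y (cellSet g x y 0)).2).2).1 + (RA x (y+1) (RA x (y-1) (RA (x+1) y (RA (x-1) y (cellSet g x y 0)).2).2).2).1) (((x-1), (y+1)) :: ((x+1), (y-1)) :: ((x+1), (y+1)) :: rest)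
      rw [st4]
      have sq5 : phi (RA (x-1) (y-1) (RA x (y+1) (RA x (y-1) (RA (x+1) y (RA (x-1) y (cellSet g x y 0)).2).2).2).2).2 ≤ phi (cellSet g x y 0) := le_trans (iofA_phi _ _ _ _) sq4
      have st5 : RB (((x-1), (y+1)) :: ((x+1), (y-1)) :: ((x+1), (y+1)) :: rest) (c + 1 + (RA (x-1) y (cellSet g x y 0)).1 + (RA (x+1) y (RA (x-1) y (cellSet g x y 0)).2).1 + (RA x (y-1) (RA (x+1) y (RA (x-1) y (cellSet g x y 0)).2).2).1 + (RA x (y+1) (RA x (y-1) (RA (x+1) y (RA (x-1) y (cellSet g x y 0)).2).2).2).1 + (RA (x-1) (y-1) (RA x (y+1) (RA x (y-1) (RA (x+1) y (RA (x-1) y (cellSet g x y 0)).2).2).2).2).1) (RA (x-1) (y-1) (RA x (y+1) (RA x (y-1) (RA (x+1) y (RA (x-1) y (cellSet g x y 0)).2).2).2).2).2 = RB (((x+1), (y-1)) :: ((x+1), (y+1)) :: rest) (c + 1 + (RA (x-1) y (cellSet g x y 0)).1 + (RA (x+1) y (RA (x-1) y (cellSet g x y 0)).2).1 + (RA x (y-1)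 (RA (x+1) y (RA (x-1) y (cellSet g x y 0)).2).2).1 + (RA x (y+1) (RA x (y-1) (RA (x+1) y (RA (x-1) y (cellSet g x y 0)).2).2).2).1 + (RA (x-1) (y-1) (RA x (y+1) (RA x (y-1) (RA (x+1) y (RA (x-1) y (cellSet g x y 0)).2).2).2).2).1 + (RA (x-1) (y+1) (RA (x-1) (y-1) (RA x (y+1) (RA x (y-1) (RA (x+1) y (RA (x-1) y (cellSet g x y 0)).2).2).2).2).2).1) (RA (x-1) (y+1) (RA (x-1) (y-1) (RA x (y+1) (RA x (y-1) (RA (x+1) y (RA (x-1) y (cellSet g x y 0)).2).2).2).2).2).2 := ih (RA (x-1) (y-1) (RA x (y+1) (RA x (y-1) (RA (x+1) y (RA (x-1) y (cellSet g x y 0)).2).2).2).2).2 (by omega) (x-1) (y+1) (c + 1 + (RA (x-1) y (cellSet g x y 0)).1 + (RA (x+1) y (RA (x-1) y (cellSet g x y 0)).2).1 + (RA x (y-1) (RA (x+1) y (RA (x-1) y (cellSet g x y 0)).2).2).1 + (RA x (y+1) (RA x (y-1) (RA (x+1) y (RA (x-1) y (cellSet g x y 0)).2).2).2).1 + (RA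 (x-1) (y-1) (RA x (y+1) (RA x (y-1) (RA (x+1) y (RA (x-1) y (cellSet g x y 0)).2).2).2).2).1) (((x+1), (y-1)) :: ((x+1), (y+1)) :: rest)
      rw [st5]
      have sq6 : phi (RA (x-1) (y+1) (RA (x-1) (y-1) (RA x (y+1) (RA x (y-1) (RA (x+1) y (RA (x-1) y (cellSet g x y 0)).2).2).2).2).2).2 ≤ phi (cellSet g x y 0) := le_trans (iofA_phi _ _ _ _) sq5
      have st6 : RB (((x+1), (y-1)) :: ((x+1), (y+1)) :: rest) (c + 1 + (RA (x-1) y (cellSet g x y 0)).1 + (RA (x+1) y (RA (x-1) y (cellSet g x y 0)).2).1 + (RA x (y-1) (RA (x+1) y (RA (x-1) y (cellSet g x y 0)).2).2).1 + (RA x (y+1) (RA x (y-1) (RA (x+1) y (RA (x-1) y (cellSet g x y 0)).2).2).2).1 + (RA (x-1) (y-1) (RA x (y+1) (RA x (y-1) (RA (x+1) y (RA (x-1) y (cellSet g x y 0)).2).2).2).2).1 + (RA (x-1) (y+1) (RA (x-1) (y-1) (RA x (y+1) (RA x (y-1) (RA (x+1) y (RA (x-1) y (cellSet g x y 0)).2).2).2).2).2).1)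 (RA (x-1) (y+1) (RA (x-1) (y-1) (RA x (y+1) (RA x (y-1) (RA (x+1) y (RA (x-1) y (cellSet g x y 0)).2).2).2).2).2).2 = RB (((x+1), (y+1)) :: rest) (c + 1 + (RA (x-1) y (cellSet g x y 0)).1 + (RA (x+1) y (RA (x-1) y (cellSet g x y 0)).2).1 + (RA x (y-1) (RA (x+1) y (RA (x-1) y (cellSet g x y 0)).2).2).1 + (RA x (y+1) (RA x (y-1) (RA (x+1) y (RA (x-1) y (cellSet g x y 0)).2).2).2).1 + (RA (x-1) (y-1) (RA x (y+1) (RA x (y-1) (RA (x+1) y (RA (x-1) y (cellSet g x y 0)).2).2).2).2).1 + (RA (x-1) (y+1) (RA (x-1) (y-1) (RA x (y+1) (RA x (y-1) (RA (x+1) y (RA (x-1) y (cellSet g x y 0)).2).2).2).2).2).1 + (RA (x+1) (y-1) (RA (x-1) (y+1) (RA (x-1) (y-1) (RA x (y+1) (RA x (y-1) (RA (x+1) y (RA (x-1) y (cellSet g x y 0)).2).2).2).2).2).2).1) (RA (x+1) (y-1) (RA (x-1) (y+1) (RA (x-1) (y-1) (RA x (y+1) (RA x (y-1) (RA (x+1)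 y (RA (x-1) y (cellSet g x y 0)).2).2).2).2).2).2).2 := ih (RA (x-1) (y+1) (RA (x-1) (y-1) (RA x (y+1) (RA x (y-1) (RA (x+1) y (RA (x-1) y (cellSet g x y 0)).2).2).2).2).2).2 (by omega) (x+1) (y-1) (c + 1 + (RA (x-1) y (cellSet g x y 0)).1 + (RA (x+1) y (RA (x-1) y (cellSet g x y 0)).2).1 + (RA x (y-1) (RA (x+1) y (RA (x-1) y (cellSet g x y 0)).2).2).1 + (RA x (y+1) (RA x (y-1) (RA (x+1) y (RA (x-1) y (cellSet g x y 0)).2).2).2).1 + (RA (x-1) (y-1) (RA x (y+1) (RA x (y-1) (RA (x+1) y (RA (x-1) y (cellSet g x y 0)).2).2).2).2).1 + (RA (x-1) (y+1) (RA (x-1) (y-1) (RA x (y+1) (RA x (y-1) (RA (x+1) y (RA (x-1) y (cellSet g x y 0)).2).2).2).2).2).1) (((x+1), (y+1)) :: rest)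
      rw [st6]
      have sq7 : phi (RA (x+1) (y-1) (RA (x-1) (y+1) (RA (x-1) (y-1) (RA x (y+1) (RA x (y-1) (RA (x+1) y (RA (x-1) y (cellSet g x y 0)).2).2).2).2).2).2).2 ≤ phi (cellSet g x y 0) := le_trans (iofA_phi _ _ _ _) sq6
      have st7 : RB (((x+1), (y+1)) :: rest) (c + 1 + (RA (x-1) y (cellSet g x y 0)).1 + (RA (x+1) y (RA (x-1) y (cellSet g x y 0)).2).1 + (RA x (y-1) (RA (x+1) y (RA (x-1) y (cellSet g x y 0)).2).2).1 + (RA x (y+1) (RA x (y-1) (RA (x+1) y (RA (x-1) y (cellSet g x y 0)).2).2).2).1 + (RA (x-1) (y-1) (RA x (y+1) (RA x (y-1) (RA (x+1) y (RA (x-1) y (cellSet g x y 0)).2).2).2).2).1 + (RA (x-1) (y+1) (RA (x-1) (y-1) (RA x (y+1) (RA x (y-1) (RA (x+1) y (RA (x-1) y (cellSet g x y 0)).2).2).2).2).2).1 + (RA (x+1) (y-1) (RA (x-1) (y+1) (RA (x-1) (y-1) (RA x (y+1) (RA x (y-1) (RA (x+1) y (RA (x-1) y (cellSet g x y 0)).2).2).2).2).2).2).1)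 (RA (x+1) (y-1) (RA (x-1) (y+1) (RA (x-1) (y-1) (RA x (y+1) (RA x (y-1) (RA (x+1) y (RA (x-1) y (cellSet g x y 0)).2).2).2).2).2).2).2 = RB (rest) (c + 1 + (RA (x-1) y (cellSet g x y 0)).1 + (RA (x+1) y (RA (x-1) y (cellSet g x y 0)).2).1 + (RA x (y-1) (RA (x+1) y (RA (x-1) y (cellSet g x y 0)).2).2).1 + (RA x (y+1) (RA x (y-1) (RA (x+1) y (RA (x-1) y (cellSet g x y 0)).2).2).2).1 + (RA (x-1) (y-1) (RA x (y+1) (RA x (y-1) (RA (x+1) y (RA (x-1) y (cellSet g x y 0)).2).2).2).2).1 + (RA (x-1) (y+1) (RA (x-1) (y-1) (RA x (y+1) (RA x (y-1) (RA (x+1) y (RA (x-1) y (cellSet g x y 0)).2).2).2).2).2).1 + (RA (x+1) (y-1) (RA (x-1) (y+1) (RA (x-1) (y-1) (RA x (y+1) (RA x (y-1) (RA (x+1) y (RA (x-1) y (cellSet g x y 0)).2).2).2).2).2).2).1 + (RA (x+1) (y+1) (RA (x+1) (y-1) (RA (x-1) (y+1) (RA (x-1) (y-1) (RA x (y+1)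 (RA x (y-1) (RA (x+1) y (RA (x-1) y (cellSet g x y 0)).2).2).2).2).2).2).2).1) (RA (x+1) (y+1) (RA (x+1) (y-1) (RA (x-1) (y+1) (RA (x-1) (y-1) (RA x (y+1) (RA x (y-1) (RA (x+1) y (RA (x-1) y (cellSet g x y 0)).2).2).2).2).2).2).2).2 := ih (RA (x+1) (y-1) (RA (x-1) (y+1) (RA (x-1) (y-1) (RA x (y+1) (RA x (y-1) (RA (x+1) y (RA (x-1) y (cellSet g x y 0)).2).2).2).2).2).2).2 (by omega) (x+1) (y+1) (c + 1 + (RA (x-1) y (cellSet g x y 0)).1 + (RA (x+1) y (RA (x-1) y (cellSet g x y 0)).2).1 + (RA x (y-1) (RA (x+1) y (RA (x-1) y (cellSet g x y 0)).2).2).1 + (RA x (y+1) (RA x (y-1) (RA (x+1) y (RA (x-1) y (cellSet g x y 0)).2).2).2).1 + (RA (x-1) (y-1) (RA x (y+1) (RA x (y-1) (RA (x+1) y (RA (x-1) y (cellSet g x y 0)).2).2).2).2).1 + (RA (x-1) (y+1) (RA (x-1) (y-1) (RA x (y+1) (RA x (y-1) (RA (x+1) y (RA (x-1) y (cellSet g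 x y 0)).2).2).2).2).2).1 + (RA (x+1) (y-1) (RA (x-1) (y+1) (RA (x-1) (y-1) (RA x (y+1) (RA x (y-1) (RA (x+1) y (RA (x-1) y (cellSet g x y 0)).2).2).2).2).2).2).1) (rest)
      rw [st7]
      have hra : RA x y g = (1 + (RA (x-1) y (cellSet g x y 0)).1 + (RA (x+1) y (RA (x-1) y (cellSet g x y 0)).2).1 + (RA x (y-1) (RA (x+1) y (RA (x-1) y (cellSet g x y 0)).2).2).1 + (RA x (y+1) (RA x (y-1) (RA (x+1) y (RA (x-1) y (cellSet g x y 0)).2).2).2).1 + (RA (x-1) (y-1) (RA x (y+1) (RA x (y-1) (RA (x+1) y (RA (x-1) y (cellSet g x y 0)).2).2).2).2).1 + (RA (x-1) (y+1) (RA (x-1) (y-1) (RA x (y+1) (RA x (y-1) (RA (x+1) y (RA (x-1) y (cellSet g x y 0)).2).2).2).2).2).1 + (RA (x+1) (y-1) (RA (x-1) (y+1) (RA (x-1) (y-1) (RA x (y+1) (RA x (y-1) (RA (x+1) y (RA (x-1) y (cellSet g x y 0)).2).2).2).2).2).2).1 + (RA (x+1) (y+1) (RA (x+1) (y-1) (RA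 (x-1) (y+1) (RA (x-1) (y-1) (RA x (y+1) (RA x (y-1) (RA (x+1) y (RA (x-1) y (cellSet g x y 0)).2).2).2).2).2).2).2).1, (RA (x+1) (y+1) (RA (x+1) (y-1) (RA (x-1) (y+1) (RA (x-1) (y-1) (RA x (y+1) (RA x (y-1) (RA (x+1) y (RA (x-1) y (cellSet g x y 0)).2).2).2).2).2).2).2).2) := by
        show iofA (phi g + 1) x y g = _
        simp only [iofA]
        rw [if_neg h1, if_neg h2, if_neg h3]
        rw [iofA_canon n (cellSet g x y 0) (by omega) (phi g) (x-1) y (by omega)]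
        rw [iofA_canon n (RA (x-1) y (cellSet g x y 0)).2 (by omega) (phi g) (x+1) y (by omega)]
        rw [iofA_canon n (RA (x+1) y (RA (x-1) y (cellSet g x y 0)).2).2 (by omega) (phi g) x (y-1) (by omega)]
        rw [iofA_canon n (RA x (y-1) (RA (x+1) y (RA (x-1) y (cellSet g x y 0)).2).2).2 (by omega) (phi g) x (y+1) (by omega)]
        rw [iofA_canon n (RA x (y+1) (RA x (y-1) (RA (x+1) y (RA (x-1) y (cellSet g x y 0)).2).2).2).2 (by omega) (phi g) (x-1) (y-1) (by omega)]
        rw [iofA_canon n (RA (x-1) (y-1) (RA x (y+1) (RA x (y-1) (RA (x+1) y (RA (x-1) y (cellSet g x y 0)).2).2).2).2).2 (by omega) (phi g) (x-1) (y+1) (by omega)]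
        rw [iofA_canon n (RA (x-1) (y+1) (RA (x-1) (y-1) (RA x (y+1) (RA x (y-1) (RA (x+1) y (RA (x-1) y (cellSet g x y 0)).2).2).2).2).2).2 (by omega) (phi g) (x+1) (y-1) (by omega)]
        rw [iofA_canon n (RA (x+1) (y-1) (RA (x-1) (y+1) (RA (x-1) (y-1) (RA x (y+1) (RA x (y-1) (RA (x+1) y (RA (x-1) y (cellSet g x y 0)).2).2).2).2).2).2).2 (by omega) (phi g) (x+1) (y+1) (by omega)]
      rw [hra]
      have hc : (c + 1 + (RA (x-1) y (cellSet g x y 0)).1 + (RA (x+1) y (RA (x-1) y (cellSet g x y 0)).2).1 + (RA x (y-1) (RA (x+1) y (RA (x-1) y (cellSet g x y 0)).2).2).1 + (RA x (y+1) (RA x (y-1) (RA (x+1) y (RA (x-1) y (cellSet g x y 0)).2).2).2).1 + (RA (x-1) (y-1) (RA x (y+1) (RA x (y-1) (RA (x+1) y (RA (x-1) y (cellSet g x y 0)).2).2).2).2).1 + (RA (x-1) (y+1) (RA (x-1) (y-1) (RA x (y+1) (RA x (y-1) (RA (x+1) y (RA (x-1) y (cellSet g x y 0)).2).2).2).2).2).1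 + (RA (x+1) (y-1) (RA (x-1) (y+1) (RA (x-1) (y-1) (RA x (y+1) (RA x (y-1) (RA (x+1) y (RA (x-1) y (cellSet g x y 0)).2).2).2).2).2).2).1 + (RA (x+1) (y+1) (RA (x+1) (y-1) (RA (x-1) (y+1) (RA (x-1) (y-1) (RA x (y+1) (RA x (y-1) (RA (x+1) y (RA (x-1) y (cellSet g x y 0)).2).2).2).2).2).2).2).1) = c + (1 + (RA (x-1) y (cellSet g x y 0)).1 + (RA (x+1) y (RA (x-1) y (cellSet g x y 0)).2).1 + (RA x (y-1) (RA (x+1) y (RA (x-1) y (cellSet g x y 0)).2).2).1 + (RA x (y+1) (RA x (y-1) (RA (x+1) y (RA (x-1) y (cellSet g x y 0)).2).2).2).1 + (RA (x-1) (y-1) (RA x (y+1) (RA x (y-1) (RA (x+1) y (RA (x-1) y (cellSet g x y 0)).2).2).2).2).1 + (RA (x-1) (y+1) (RA (x-1) (y-1) (RA x (y+1) (RA x (y-1) (RA (x+1) y (RA (x-1) y (cellSet g x y 0)).2).2).2).2).2).1 + (RA (x+1) (y-1) (RA (x-1) (y+1) (RA (x-1) (y-1) (RA x (y+1) (RA x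 (y-1) (RA (x+1) y (RA (x-1) y (cellSet g x y 0)).2).2).2).2).2).2).1 + (RA (x+1) (y+1) (RA (x+1) (y-1) (RA (x-1) (y+1) (RA (x-1) (y-1) (RA x (y+1) (RA x (y-1) (RA (x+1) y (RA (x-1) y (cellSet g x y 0)).2).2).2).2).2).2).2).1) := by ring
      rw [hc]

-- ===== VERDICT (by name: the statement is the Claim_ definition above) =====
theorem increase_or_flash_spec : Claim_equal_increase_or_flash := by
  intro x y g _
  unfold Spec_increase_or_flash increase_or_flash increase_or_flash_alt
  have h1 : iofB (9 * phi g + 9) [(x, y)] 0 g = RB [(x, y)] 0 g := by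
    unfold RB
    exact iofB_irrel _ _ _ _ _ (by simp; omega) (by simp)
  rw [h1, sim (phi g) g le_rfl x y 0 []]
  unfold RB
  rw [iofB_nil]
  show (iofA (phi g + 1) x y g).1 = 0 + (RA x y g).1
  unfold RA
  omega
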